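-- pv_equiv track=rewrite | github.com/Fuzzyslippers412/Mycasapro | agents/persona_registry.py | _extract_escalation
-- ===== SOURCE A (Python) =====
-- from typing import Dict, List, Any, Optional
--
-- def _extract_escalation(soul_content: str) -> List[str]:
--     """Extract escalation targets from SOUL.md"""
--     escalates = []
--     for line in soul_content.split("\n"):
--         lower = line.lower()
--         if "escalate" in lower and ("manager" in lower or "galidima" in lower):
--             escalates.append("manager")
--         if "escalate" in lower and "janitor" in lower:
--             escalates.append("janitor")
--     return list(set(escalates))
-- ===== SOURCE B (Python) =====
-- def _extract_escalation(soul_content: str):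
--     """Extract escalation targets from SOUL.md"""
--     lines = soul_content.split("\n")
--     # inverted index: keyword -> set of line numbers containing it (case-insensitive)
--     occ = {}
--     for kw in ("escalate", "manager", "galidima", "janitor"):
--         occ[kw] = {i for i, l in enumerate(lines) if kw in l.lower()}
--     targets = []
--     if occ["escalate"] & (occ["manager"] | occ["galidima"]):
--         targets.append("manager")
--     if occ["escalate"] & occ["janitor"]:
--         targets.append("janitor")
--     return targets
-- ===== Notes on version B (the rewrite author's own statement) =====
-- stated objective: alternative
-- what changed: Replaces A's per-line accumulate-then-dedup loop with an inverted index mapping each keyword to the set of line numbers containing it, then decides each target by set intersection (escalate-lines & manager/galidima-lines, escalate-lines & janitor-lines).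
import Mathlib
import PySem

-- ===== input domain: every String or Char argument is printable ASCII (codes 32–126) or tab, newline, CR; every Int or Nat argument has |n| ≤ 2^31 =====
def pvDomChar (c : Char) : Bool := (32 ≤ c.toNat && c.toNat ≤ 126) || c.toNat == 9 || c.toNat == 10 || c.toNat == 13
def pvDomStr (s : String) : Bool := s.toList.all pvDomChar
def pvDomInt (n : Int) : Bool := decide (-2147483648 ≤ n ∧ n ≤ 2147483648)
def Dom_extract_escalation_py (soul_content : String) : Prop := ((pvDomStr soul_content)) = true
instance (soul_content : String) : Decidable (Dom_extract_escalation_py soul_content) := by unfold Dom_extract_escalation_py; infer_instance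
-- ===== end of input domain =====

-- B replaces A's accumulate-then-dedup line loop by an inverted index (keyword -> set of line
-- numbers) queried by set intersection (alternative algorithm, same cost). Equivalence is about
-- the return value.

-- ===== PORT A =====
-- literal transliteration of A; s.split("\n") is PySem.Str.split? (always some: the separator is
-- the nonempty literal "\n", so .getD [] is exact); list(set(escalates)) is ported as
-- PySem.Set.ofList, which is exact as a set; Pre_ below keeps only inputs where the set has at
-- most one element, where Python's hash iteration order cannot matter.
def extract_escalation_py (soul_content : String) : List String :=
  let escalates : List String := []
  let escalates := ((PySem.Str.split? soul_content "\n").getD []).foldl (fun escalates line =>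
    let lower := PySem.Str.lower line
    let escalates :=
      if PySem.Str.isIn "escalate" lower &&
         (PySem.Str.isIn "manager" lower || PySem.Str.isIn "galidima" lower) then
        escalates ++ ["manager"]
      else escalates
    if PySem.Str.isIn "escalate" lower && PySem.Str.isIn "janitor" lower then
      escalates ++ ["janitor"]
    else escalates) escalates
  PySem.Set.ofList escalates

-- ===== PORT B =====
-- the set comprehension {i for i, l in enumerate(lines) if kw in l.lower()} is
-- PySem.Set.ofList of the filtered-and-projected enumerate list (exact: enumerate order is
-- deterministic); Python set truthiness 'if s:' is '≠ []'.
def extract_escalation_py_alt (soul_content : String) : List String :=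
  let lines := (PySem.Str.split? soul_content "\n").getD []
  let occ : PySem.Dict String (PySem.Set Int) :=
    ["escalate", "manager", "galidima", "janitor"].foldl (fun d kw =>
      PySem.Dict.insert d kw (PySem.Set.ofList
        (((PySem.List.enumerate lines).filter
            (fun p => PySem.Str.isIn kw (PySem.Str.lower p.2))).map (·.1)))) PySem.Dict.empty
  let targets : List String := []
  let targets :=
    if PySem.Set.inter (PySem.Dict.getD occ "escalate" [])
        (PySem.Set.union (PySem.Dict.getD occ "manager" [])
          (PySem.Dict.getD occ "galidima" [])) ≠ [] then
      targets ++ ["manager"]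
    else targets
  let targets :=
    if PySem.Set.inter (PySem.Dict.getD occ "escalate" [])
        (PySem.Dict.getD occ "janitor" []) ≠ [] then
      targets ++ ["janitor"]
    else targets
  targets

-- ===== PRECONDITION & SPEC =====
-- Pre_ excludes inputs that trigger BOTH targets: there A returns list(set(...)) of a
-- two-element set, whose order is an accident of Python's hash seed (it varies across runs),
-- so neither order is the specified value.
def Pre_extract_escalation_py (soul_content : String) : Prop :=
  ¬ ((((PySem.Str.split? soul_content "\n").getD []).any (fun line =>
        let l := PySem.Str.lower line
        PySem.Str.isIn "escalate" l &&
          (PySem.Str.isIn "manager" l || PySem.Str.isIn "galidima" l))) = true ∧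
     (((PySem.Str.split? soul_content "\n").getD []).any (fun line =>
        let l := PySem.Str.lower line
        PySem.Str.isIn "escalate" l && PySem.Str.isIn "janitor" l)) = true)
instance (soul_content : String) : Decidable (Pre_extract_escalation_py soul_content) := by
  unfold Pre_extract_escalation_py; infer_instance

def pvWitness_extract_escalation_py : String := "Escalate issues to the Manager.\nCleaning is fine."

def Spec_extract_escalation_py (soul_content : String) (out : List String) : Prop := out = extract_escalation_py_alt soul_content
instance (soul_content : String) (out : List String) : Decidable (Spec_extract_escalation_py soul_content out) := by unfold Spec_extract_escalation_py; infer_instance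

-- ===== CLAIM (what is proved, stated in full; the proofs are below) =====
def Claim_equal_extract_escalation_py : Prop := ∀ (soul_content : String), Dom_extract_escalation_py soul_content → Pre_extract_escalation_py soul_content → Spec_extract_escalation_py soul_content (extract_escalation_py soul_content)

-- ===== LEMMAS AND PROOFS =====

-- per-line payload of A's loop body
def pvLineOut (line : String) : List String :=
  let l := PySem.Str.lower line
  (if PySem.Str.isIn "escalate" l &&
      (PySem.Str.isIn "manager" l || PySem.Str.isIn "galidima" l) then ["manager"] else []) ++
  (if PySem.Str.isIn "escalate" l && PySem.Str.isIn "janitor" l then ["janitor"] else [])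

-- the occurrence set B's dict stores under kw
def pvOcc (L : List String) (kw : String) : PySem.Set Int :=
  PySem.Set.ofList (((PySem.List.enumerate L).filter
    (fun p => PySem.Str.isIn kw (PySem.Str.lower p.2))).map (·.1))

lemma escalates_eq_flatMap (L : List String) (acc : List String) :
    L.foldl (fun escalates line =>
      let lower := PySem.Str.lower line
      let escalates :=
        if PySem.Str.isIn "escalate" lower &&
           (PySem.Str.isIn "manager" lower || PySem.Str.isIn "galidima" lower) then
          escalates ++ ["manager"]
        else escalates
      if PySem.Str.isIn "escalate" lower && PySem.Str.isIn "janitor" lower then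
        escalates ++ ["janitor"]
      else escalates) acc = acc ++ L.flatMap pvLineOut := by
  have h : (fun (escalates : List String) (line : String) =>
      let lower := PySem.Str.lower line
      let escalates :=
        if PySem.Str.isIn "escalate" lower &&
           (PySem.Str.isIn "manager" lower || PySem.Str.isIn "galidima" lower) then
          escalates ++ ["manager"]
        else escalates
      if PySem.Str.isIn "escalate" lower && PySem.Str.isIn "janitor" lower then
        escalates ++ ["janitor"]
      else escalates) = fun escalates line => escalates ++ pvLineOut line := by
    funext acc line
    simp only [pvLineOut]
    split_ifs <;> simp
  rw [h, PySem.List.foldl_append_eq_flatMap]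

lemma nodup_single_mem {a : String} {l : List String} (hn : l.Nodup)
    (hm : ∀ x, x ∈ l ↔ x = a) : l = [a] := by
  cases l with
  | nil => exact absurd ((hm a).mpr rfl) (by simp)
  | cons b t =>
    have hb : b = a := (hm b).mp (by simp)
    subst hb
    have ht : t = [] := by
      cases t with
      | nil => rfl
      | cons c u =>
        have hc : c = b := (hm c).mp (by simp)
        subst hc
        simp at hn
    simp [ht]

lemma ofList_const (xs : List String) (a : String) (hne : xs ≠ [])
    (h : ∀ x ∈ xs, x = a) : PySem.Set.ofList xs = [a] := by
  apply nodup_single_mem (PySem.Set.nodup_ofList xs)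
  intro x
  rw [PySem.Set.mem_ofList]
  constructor
  · exact h x
  · rintro rfl
    cases xs with
    | nil => exact absurd rfl hne
    | cons b t => rw [← h b (by simp)]; simp

lemma mem_pvOcc (L : List String) (kw : String) (x : Int) :
    x ∈ pvOcc L kw ↔
      ∃ (k : Nat) (h : k < L.length),
        x = (k : Int) ∧ PySem.Str.isIn kw (PySem.Str.lower L[k]) = true := by
  simp [pvOcc, PySem.Set.mem_ofList, List.mem_filter, PySem.List.mem_enumerate_iff]

lemma natCast_mem_pvOcc (L : List String) (kw : String) (k : Nat) (hk : k < L.length) :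
    ((k : Int) ∈ pvOcc L kw) ↔ PySem.Str.isIn kw (PySem.Str.lower L[k]) = true := by
  rw [mem_pvOcc]
  constructor
  · rintro ⟨k', hk', hkk, h⟩
    have : k = k' := by exact_mod_cast hkk
    subst this; exact h
  · intro h; exact ⟨k, hk, rfl, h⟩

-- generic bridge: "escalate-lines ∩ S nonempty" = "some line has escalate and q"
lemma inter_pvOcc_ne_nil (L : List String) (S : List Int) (q : String → Bool)
    (hS : ∀ (k : Nat) (hk : k < L.length), ((k : Int) ∈ S ↔ q L[k] = true)) :
    (PySem.Set.inter (pvOcc L "escalate") S ≠ []) ↔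
    (L.any (fun line => PySem.Str.isIn "escalate" (PySem.Str.lower line) && q line) = true) := by
  rw [List.any_eq_true]
  constructor
  · intro h
    obtain ⟨x, hx⟩ := List.exists_mem_of_ne_nil _ h
    rw [PySem.Set.mem_inter] at hx
    obtain ⟨hE, hSx⟩ := hx
    rw [mem_pvOcc] at hE
    obtain ⟨k, hk, rfl, hesc⟩ := hE
    exact ⟨L[k], List.getElem_mem hk,
      by rw [Bool.and_eq_true]; exact ⟨hesc, (hS k hk).mp hSx⟩⟩
  · rintro ⟨line, hline, hp⟩
    obtain ⟨k, hk, rfl⟩ := List.mem_iff_getElem.mp hline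
    rw [Bool.and_eq_true] at hp
    intro hnil
    have hmem : (k : Int) ∈ PySem.Set.inter (pvOcc L "escalate") S := by
      rw [PySem.Set.mem_inter]
      exact ⟨(natCast_mem_pvOcc L _ k hk).mpr hp.1, (hS k hk).mpr hp.2⟩
    rw [hnil] at hmem
    simp at hmem

-- B's dict lookups reduce to pvOcc
lemma getD_occ (L : List String) (kw : String) (hkw : kw ∈ ["escalate", "manager", "galidima", "janitor"]) :
    PySem.Dict.getD
      (["escalate", "manager", "galidima", "janitor"].foldl (fun d kw =>
        PySem.Dict.insert d kw (PySem.Set.ofList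
          (((PySem.List.enumerate L).filter
              (fun p => PySem.Str.isIn kw (PySem.Str.lower p.2))).map (·.1)))) PySem.Dict.empty)
      kw [] = pvOcc L kw := by
  fin_cases hkw <;>
    simp [List.foldl, PySem.Dict.getD_insert, pvOcc]

lemma inter_ne_nil_iff_manager (L : List String) :
    (PySem.Set.inter (pvOcc L "escalate")
      (PySem.Set.union (pvOcc L "manager") (pvOcc L "galidima")) ≠ []) ↔
    (L.any (fun line =>
      PySem.Str.isIn "escalate" (PySem.Str.lower line) &&
        (PySem.Str.isIn "manager" (PySem.Str.lower line) ||
          PySem.Str.isIn "galidima" (PySem.Str.lower line))) = true) := by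
  apply inter_pvOcc_ne_nil
  intro k hk
  rw [PySem.Set.mem_union, natCast_mem_pvOcc L _ k hk, natCast_mem_pvOcc L _ k hk,
    Bool.or_eq_true]

lemma inter_ne_nil_iff_janitor (L : List String) :
    (PySem.Set.inter (pvOcc L "escalate") (pvOcc L "janitor") ≠ []) ↔
    (L.any (fun line =>
      PySem.Str.isIn "escalate" (PySem.Str.lower line) &&
        PySem.Str.isIn "janitor" (PySem.Str.lower line)) = true) := by
  apply inter_pvOcc_ne_nil
  intro k hk
  exact natCast_mem_pvOcc L _ k hk

-- ===== VERDICT (by name: the statement is the Claim_ definition above) =====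
theorem extract_escalation_py_spec : Claim_equal_extract_escalation_py := by
  intro s _ hpre
  unfold Spec_extract_escalation_py extract_escalation_py extract_escalation_py_alt
  unfold Pre_extract_escalation_py at hpre
  dsimp only at hpre ⊢
  rw [escalates_eq_flatMap]
  rw [getD_occ ((PySem.Str.split? s "\n").getD []) "escalate" (by decide),
      getD_occ ((PySem.Str.split? s "\n").getD []) "manager" (by decide),
      getD_occ ((PySem.Str.split? s "\n").getD []) "galidima" (by decide),
      getD_occ ((PySem.Str.split? s "\n").getD []) "janitor" (by decide)]
  simp only [inter_ne_nil_iff_manager, inter_ne_nil_iff_janitor, List.nil_append]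
  set L := (PySem.Str.split? s "\n").getD [] with hL
  set p1 : String → Bool := fun line =>
    PySem.Str.isIn "escalate" (PySem.Str.lower line) &&
      (PySem.Str.isIn "manager" (PySem.Str.lower line) ||
        PySem.Str.isIn "galidima" (PySem.Str.lower line)) with hp1
  set p2 : String → Bool := fun line =>
    PySem.Str.isIn "escalate" (PySem.Str.lower line) &&
      PySem.Str.isIn "janitor" (PySem.Str.lower line) with hp2
  have hpvl : ∀ line, pvLineOut line =
      (if p1 line then ["manager"] else []) ++ (if p2 line then ["janitor"] else []) := by
    intro line; simp [pvLineOut, hp1, hp2]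
  by_cases h1 : L.any p1 = true
  · have h2 : L.any p2 = false := by
      by_contra hc
      exact hpre ⟨h1, by simpa using hc⟩
    have h2' : ∀ line ∈ L, p2 line = false := by
      simpa [List.any_eq_false] using h2
    have hall : ∀ x ∈ L.flatMap pvLineOut, x = "manager" := by
      intro x hx
      rw [List.mem_flatMap] at hx
      obtain ⟨line, hline, hxl⟩ := hx
      rw [hpvl, h2' line hline] at hxl
      simp at hxl
      rcases hxl with ⟨_, rfl⟩; rfl
    have hne : L.flatMap pvLineOut ≠ [] := by
      rw [List.any_eq_true] at h1
      obtain ⟨line, hline, hp⟩ := h1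
      intro hnil
      have : "manager" ∈ L.flatMap pvLineOut := by
        rw [List.mem_flatMap]
        exact ⟨line, hline, by rw [hpvl, hp]; simp⟩
      rw [hnil] at this; simp at this
    rw [ofList_const _ "manager" hne hall]
    simp [h1, h2]
  · have h1f : L.any p1 = false := eq_false_of_ne_true h1
    have h1' : ∀ line ∈ L, p1 line = false := by
      simpa [List.any_eq_false] using h1f
    by_cases h2 : L.any p2 = true
    · have hall : ∀ x ∈ L.flatMap pvLineOut, x = "janitor" := by
        intro x hx
        rw [List.mem_flatMap] at hx
        obtain ⟨line, hline, hxl⟩ := hx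
        rw [hpvl, h1' line hline] at hxl
        simp at hxl
        rcases hxl with ⟨_, rfl⟩; rfl
      have hne : L.flatMap pvLineOut ≠ [] := by
        rw [List.any_eq_true] at h2
        obtain ⟨line, hline, hp⟩ := h2
        intro hnil
        have : "janitor" ∈ L.flatMap pvLineOut := by
          rw [List.mem_flatMap]
          exact ⟨line, hline, by rw [hpvl, hp, h1' line hline]; simp⟩
        rw [hnil] at this; simp at this
      rw [ofList_const _ "janitor" hne hall]
      simp [h1f, h2]
    · have h2f : L.any p2 = false := eq_false_of_ne_true h2
      have h2' : ∀ line ∈ L, p2 line = false := by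
        simpa [List.any_eq_false] using h2f
      have hempty : L.flatMap pvLineOut = [] := by
        rw [List.flatMap_eq_nil_iff]
        intro line hline
        rw [hpvl, h1' line hline, h2' line hline]; simp
      rw [hempty]
      simp [h1f, h2f]
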